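-- pv_equiv track=rewrite | github.com/msg-byu/autoGR | src/opf_python/universal.py | get_HNF_diagonals
-- ===== SOURCE A (Python) =====
-- def get_HNF_diagonals(n):
--     """Finds the diagonals of the HNF that reach the target n value.
--
--     Args:
--         n (int): The target determinant for the HNF.
--
--     Retruns:
--         diags (list of lists): The allowed values of the determinant.
--     """
--
--     diags = []
--     for i in range(1,n+1):
--         if not n%i == 0:
--             continue
--         else:
--             q = n//i
--             for j in range(1,q+1):
--                 if not q%j == 0:
--                     continue
--                 else:
--                     diags.append([i,j,q//j])
--
--     return diags
-- ===== SOURCE B (Python) =====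
-- def get_HNF_diagonals(n):
--     """Same result as A: all triples [i, j, k] with i*j*k == n, ordered by
--     i ascending then j ascending, but enumerating divisors in O(sqrt) time."""
--     if n < 1:
--         return []
--
--     def divisors(m):
--         small = []
--         large = []
--         d = 1
--         while d * d <= m:
--             if m % d == 0:
--                 small.append(d)
--                 if d * d != m:
--                     large.append(m // d)
--             d += 1
--         return small + large[::-1]
--
--     return [[i, j, (n // i) // j] for i in divisors(n) for j in divisors(n // i)]
-- ===== Notes on version B (the rewrite author's own statement) =====
-- stated objective: faster
-- what changed: Instead of trial-dividing every integer in 1..n (and 1..q inside), B enumerates the divisors of n (and of each quotient q) by pairing d and m//d for d up to sqrt(m), then emits the triples by a flat double iteration over those sorted divisor lists.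
import Mathlib
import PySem

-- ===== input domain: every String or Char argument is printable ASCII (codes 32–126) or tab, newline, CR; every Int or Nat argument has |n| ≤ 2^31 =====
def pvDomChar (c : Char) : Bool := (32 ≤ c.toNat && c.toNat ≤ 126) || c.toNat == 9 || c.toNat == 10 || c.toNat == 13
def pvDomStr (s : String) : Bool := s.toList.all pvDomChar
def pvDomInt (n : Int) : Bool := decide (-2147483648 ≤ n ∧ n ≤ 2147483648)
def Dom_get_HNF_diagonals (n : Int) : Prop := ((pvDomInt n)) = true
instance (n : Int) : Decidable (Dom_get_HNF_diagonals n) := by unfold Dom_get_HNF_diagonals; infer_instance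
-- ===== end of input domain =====

-- B replaces A's O(n) trial-division loops with paired divisor enumeration bounded by sqrt(m): faster (asymptotic, in a timing run).


-- ===== PORT A =====
def get_HNF_diagonals (n : Int) : List (List Int) :=
  (PySem.List.pyRange 1 (n+1) 1).foldl (fun diags i =>
    if ¬ (PySem.Int.mod n i = 0) then diags
    else
      let q := PySem.Int.floordiv n i
      (PySem.List.pyRange 1 (q+1) 1).foldl (fun dg j =>
        if ¬ (PySem.Int.mod q j = 0) then dg
        else dg ++ [[i, j, PySem.Int.floordiv q j]]) diags) []

-- ===== PORT B =====
-- while-loop of Source B's divisors(): fuel = m.toNat + 1 bounds the iterations (d*d ≤ m forces d ≤ m)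
def divLoop (m : Int) : Nat → Int → List Int → List Int → List Int × List Int
  | 0, _, small, large => (small, large)
  | fuel+1, d, small, large =>
    if d * d ≤ m then
      if PySem.Int.mod m d = 0 then
        divLoop m fuel (d+1) (small ++ [d])
          (if d * d ≠ m then large ++ [PySem.Int.floordiv m d] else large)
      else divLoop m fuel (d+1) small large
    else (small, large)

def divisors (m : Int) : List Int :=
  let p := divLoop m (m.toNat + 1) 1 [] []
  p.1 ++ p.2.reverse

def get_HNF_diagonals_alt (n : Int) : List (List Int) :=
  if n < 1 then []
  else (divisors n).flatMap (fun i =>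
    (divisors (PySem.Int.floordiv n i)).map
      (fun j => [i, j, PySem.Int.floordiv (PySem.Int.floordiv n i) j]))

-- ===== PRECONDITION & SPEC =====
def Spec_get_HNF_diagonals (n : Int) (out : List (List Int)) : Prop := out = get_HNF_diagonals_alt n
instance (n : Int) (out : List (List Int)) : Decidable (Spec_get_HNF_diagonals n out) := by unfold Spec_get_HNF_diagonals; infer_instance

-- ===== CLAIM (what is proved, stated in full; the proofs are below) =====
def Claim_equal_get_HNF_diagonals : Prop := ∀ (n : Int), Dom_get_HNF_diagonals n → Spec_get_HNF_diagonals n (get_HNF_diagonals n)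

-- ===== LEMMAS AND PROOFS =====

theorem divLoop_spec (m : Int) (fuel : Nat) (d : Int) (hd : 1 ≤ d)
    (hfuel : (m - d + 1).toNat ≤ fuel) (small large : List Int) :
    divLoop m fuel d small large =
      (small ++ (PySem.List.pyRange d (m+1) 1).filter
          (fun e => decide (e*e ≤ m ∧ PySem.Int.mod m e = 0)),
       large ++ ((PySem.List.pyRange d (m+1) 1).filter
          (fun e => decide (e*e ≤ m ∧ e*e ≠ m ∧ PySem.Int.mod m e = 0))).map
          (fun e => PySem.Int.floordiv m e)) := by
  induction fuel generalizing d small large with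
  | zero =>
    have hda : m + 1 ≤ d := by omega
    simp [divLoop, PySem.List.pyRange_one_eq_nil hda]
  | succ fuel ih =>
    by_cases h : d * d ≤ m
    · have hdm : d ≤ m := le_trans (le_mul_of_one_le_left (by omega) hd) h
      have hcons := PySem.List.pyRange_one_cons (a := d) (b := m+1) (by omega)
      by_cases hmod : PySem.Int.mod m d = 0
      · by_cases hne : d * d ≠ m
        · rw [show divLoop m (fuel+1) d small large
                = divLoop m fuel (d+1) (small ++ [d]) (large ++ [PySem.Int.floordiv m d]) by
                simp [divLoop, h, hmod, hne]]
          rw [ih (d+1) (by omega) (by omega)]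
          rw [hcons]
          simp [h, hmod, hne]
        · push_neg at hne
          rw [show divLoop m (fuel+1) d small large
                = divLoop m fuel (d+1) (small ++ [d]) large by
                simp [divLoop, h, hmod, hne]]
          rw [ih (d+1) (by omega) (by omega)]
          rw [hcons]
          simp [hmod, hne]
      · rw [show divLoop m (fuel+1) d small large = divLoop m fuel (d+1) small large by
              simp [divLoop, h, hmod]]
        rw [ih (d+1) (by omega) (by omega)]
        rw [hcons]
        simp [hmod]
    · have hbig : ∀ e : Int, d ≤ e → ¬ (e * e ≤ m) := by
        intro e he hle
        have : d * d ≤ e * e := mul_le_mul he he (by omega) (by omega)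
        omega
      have hnil : ∀ (p : Int → Bool), (∀ e, d ≤ e → p e = false) →
          (PySem.List.pyRange d (m+1) 1).filter p = [] := by
        intro p hp
        rw [List.filter_eq_nil_iff]
        intro e he
        simp [hp e (PySem.List.mem_pyRange_one.mp he).1]
      rw [show divLoop m (fuel+1) d small large = (small, large) by simp [divLoop, h]]
      rw [hnil _ (by intro e he; simp [hbig e he]), hnil _ (by intro e he; simp [hbig e he])]
      simp

theorem quot_facts (m e : Int) (hm : 1 ≤ m) (he : 1 ≤ e) (hdvd : e ∣ m) :
    (m / e) * e = m ∧ 1 ≤ m / e ∧ m / e ≤ m ∧ (m / e) ∣ m := by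
  have h0 : (0:Int) < e := by omega
  have hme : e ≤ m := Int.le_of_dvd (by omega) hdvd
  have hmul : (m / e) * e = m := Int.ediv_mul_cancel hdvd
  have h1 : 1 ≤ m / e := by
    rw [Int.le_ediv_iff_mul_le h0]; omega
  refine ⟨hmul, h1, by nlinarith, ⟨e, by omega⟩⟩

theorem divisors_eq_filter (m : Int) (hm : 1 ≤ m) :
    divisors m = (PySem.List.pyRange 1 (m+1) 1).filter (fun e => decide (PySem.Int.mod m e = 0)) := by
  have hspec := divLoop_spec m (m.toNat + 1) 1 le_rfl (by omega) [] []
  have hfd : ∀ e : Int, 1 ≤ e → PySem.Int.floordiv m e = m / e := fun e he =>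
    PySem.Int.floordiv_eq_ediv_of_pos (by omega)
  unfold divisors
  rw [hspec]
  simp only [List.nil_append]
  set R := PySem.List.pyRange 1 (m+1) 1 with hR
  have hmemR : ∀ x : Int, x ∈ R ↔ 1 ≤ x ∧ x < m + 1 := fun x => PySem.List.mem_pyRange_one
  set S := R.filter (fun e => decide (e*e ≤ m ∧ PySem.Int.mod m e = 0)) with hS
  set L := R.filter (fun e => decide (e*e ≤ m ∧ e*e ≠ m ∧ PySem.Int.mod m e = 0)) with hL
  have hmemS : ∀ x : Int, x ∈ S ↔ 1 ≤ x ∧ x * x ≤ m ∧ x ∣ m := by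
    intro x
    simp only [hS, List.mem_filter, hmemR, decide_eq_true_eq, PySem.Int.mod_eq_zero_iff_dvd]
    constructor
    · rintro ⟨⟨h1, h2⟩, h3, h4⟩; exact ⟨h1, h3, h4⟩
    · rintro ⟨h1, h3, h4⟩
      exact ⟨⟨h1, by have := Int.le_of_dvd (by omega) h4; omega⟩, h3, h4⟩
  have hmemL : ∀ x : Int, x ∈ L.map (fun e => PySem.Int.floordiv m e) ↔
      ∃ e, (1 ≤ e ∧ e * e ≤ m ∧ e * e ≠ m ∧ e ∣ m) ∧ m / e = x := by
    intro x
    simp only [hL, List.mem_map, List.mem_filter, hmemR, decide_eq_true_eq,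
      PySem.Int.mod_eq_zero_iff_dvd]
    constructor
    · rintro ⟨e, ⟨⟨h1, h2⟩, h3, h4, h5⟩, h6⟩
      exact ⟨e, ⟨h1, h3, h4, h5⟩, by rw [← hfd e h1]; exact h6⟩
    · rintro ⟨e, ⟨h1, h3, h4, h5⟩, h6⟩
      have hme : e ≤ m := Int.le_of_dvd (by omega) h5
      exact ⟨e, ⟨⟨h1, by omega⟩, h3, h4, h5⟩, by rw [hfd e h1]; exact h6⟩
  -- every element of the large half is a divisor strictly above the square root
  have hlarge_big : ∀ x : Int, x ∈ L.map (fun e => PySem.Int.floordiv m e) →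
      1 ≤ x ∧ m < x * x ∧ x ∣ m := by
    intro x hx
    obtain ⟨e, ⟨h1, h3, h4, h5⟩, h6⟩ := (hmemL x).mp hx
    obtain ⟨hmul, hq1, hqm, hqdvd⟩ := quot_facts m e hm h1 h5
    subst h6
    refine ⟨hq1, ?_, hqdvd⟩
    have hlt : e < m / e := by
      by_contra hq
      push_neg at hq
      have : (m / e) * e ≤ e * e := mul_le_mul_of_nonneg_right hq (by omega)
      omega
    have : (m / e) * e < (m / e) * (m / e) := mul_lt_mul_of_pos_left hlt (by omega)
    linarith
  have hmemL' : ∀ x : Int, x ∈ L → 1 ≤ x ∧ x ∣ m := by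
    intro x hx
    simp only [hL, List.mem_filter, hmemR, decide_eq_true_eq, PySem.Int.mod_eq_zero_iff_dvd] at hx
    exact ⟨hx.1.1, hx.2.2.2⟩
  have hpwL : (L.map (fun e => PySem.Int.floordiv m e)).Pairwise (fun a b => b < a) := by
    rw [List.pairwise_map]
    refine List.Pairwise.imp_of_mem ?_ (List.Pairwise.filter _ (PySem.List.pairwise_lt_pyRange_one 1 (m+1)))
    intro a b ha hb hab
    obtain ⟨ha1, hadvd⟩ := hmemL' a ha
    obtain ⟨hb1, hbdvd⟩ := hmemL' b hb
    obtain ⟨hmula, hqa1, _, _⟩ := quot_facts m a hm ha1 hadvd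
    obtain ⟨hmulb, hqb1, _, _⟩ := quot_facts m b hm hb1 hbdvd
    rw [hfd a ha1, hfd b hb1]
    have h1 : (m / b) * a < (m / b) * b := mul_lt_mul_of_pos_left hab (by omega)
    have h2 : (m / b) * a < (m / a) * a := by linarith
    exact lt_of_mul_lt_mul_right h2 (by omega)
  have hpw : (S ++ (L.map (fun e => PySem.Int.floordiv m e)).reverse).Pairwise (· < ·) := by
    rw [List.pairwise_append]
    refine ⟨List.Pairwise.filter _ (PySem.List.pairwise_lt_pyRange_one 1 (m+1)), ?_, ?_⟩
    · rw [List.pairwise_reverse]; exact hpwL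
    · intro a ha b hb
      rw [List.mem_reverse] at hb
      obtain ⟨ha1, ha3, _⟩ := (hmemS a).mp ha
      obtain ⟨hb1, hb2, _⟩ := hlarge_big b hb
      by_contra hab
      push_neg at hab
      have : b * b ≤ a * a := mul_le_mul hab hab (by omega) (by omega)
      omega
  have hperm : (S ++ (L.map (fun e => PySem.Int.floordiv m e)).reverse).Perm
      (R.filter (fun e => decide (PySem.Int.mod m e = 0))) := by
    have nd1 : (S ++ (L.map (fun e => PySem.Int.floordiv m e)).reverse).Nodup :=
      hpw.imp ne_of_lt
    have nd2 : (R.filter (fun e => decide (PySem.Int.mod m e = 0))).Nodup :=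
      List.Nodup.filter _ (PySem.List.nodup_pyRange_one 1 (m+1))
    rw [List.perm_ext_iff_of_nodup nd1 nd2]
    intro x
    simp only [List.mem_append, List.mem_reverse, hmemS,
      List.mem_filter, hmemR, decide_eq_true_eq, PySem.Int.mod_eq_zero_iff_dvd]
    constructor
    · rintro (⟨h1, h3, h4⟩ | hx)
      · exact ⟨⟨h1, by have := Int.le_of_dvd (by omega) h4; omega⟩, h4⟩
      · obtain ⟨h1, h2, h3⟩ := hlarge_big x hx
        exact ⟨⟨h1, by have := Int.le_of_dvd (by omega) h3; omega⟩, h3⟩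
    · rintro ⟨⟨h1, h2⟩, h3⟩
      by_cases hsq : x * x ≤ m
      · exact Or.inl ⟨h1, hsq, h3⟩
      · refine Or.inr ((hmemL x).mpr ?_)
        obtain ⟨hmul, hq1, hqm, hqdvd⟩ := quot_facts m x hm h1 h3
        have hqlt : m / x < x := by
          by_contra hq
          push_neg at hq
          have : x * x ≤ (m / x) * x := mul_le_mul_of_nonneg_right hq (by omega)
          omega
        have hlt2 : (m / x) * (m / x) < m := by
          have : (m / x) * (m / x) < (m / x) * x := mul_lt_mul_of_pos_left hqlt (by omega)
          linarith
        refine ⟨m / x, ⟨hq1, by omega, by omega, hqdvd⟩, ?_⟩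
        have hx0 : (m / x) ≠ 0 := by omega
        calc m / (m / x) = ((m / x) * x) / (m / x) := by rw [hmul]
            _ = x := Int.mul_ediv_cancel_left x hx0
  have hpw2 : (R.filter (fun e => decide (PySem.Int.mod m e = 0))).Pairwise (· < ·) :=
    List.Pairwise.filter _ (PySem.List.pairwise_lt_pyRange_one 1 (m+1))
  exact hperm.eq_of_pairwise (fun a b _ _ hab hba => absurd hba (lt_asymm hab)) hpw hpw2

-- the inner j-loop of A, in filter/map form
theorem inner_fold (q i : Int) (acc : List (List Int)) :
    List.foldl (fun dg j => if PySem.Int.mod q j = 0 then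
        dg ++ [[i, j, PySem.Int.floordiv q j]] else dg) acc (PySem.List.pyRange 1 (q+1) 1)
    = acc ++ ((PySem.List.pyRange 1 (q+1) 1).filter (fun j => decide (PySem.Int.mod q j = 0))).map
        (fun j => [i, j, PySem.Int.floordiv q j]) := by
  exact PySem.List.foldl_append_ite
    (p := fun j => PySem.Int.mod q j = 0)
    (f := fun j => [i, j, PySem.Int.floordiv q j]) _ _

-- A's nested trial-division loops, in filter/flatMap form
theorem a_eq_flatMap (n : Int) :
    get_HNF_diagonals n =
      ((PySem.List.pyRange 1 (n+1) 1).filter (fun i => decide (PySem.Int.mod n i = 0))).flatMap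
        (fun i => ((PySem.List.pyRange 1 (PySem.Int.floordiv n i + 1) 1).filter
            (fun j => decide (PySem.Int.mod (PySem.Int.floordiv n i) j = 0))).map
            (fun j => [i, j, PySem.Int.floordiv (PySem.Int.floordiv n i) j])) := by
  simp only [get_HNF_diagonals, ite_not]
  rw [PySem.List.foldl_ite_eq_foldl_filter]
  simp only [inner_fold]
  rw [PySem.List.foldl_append_eq_flatMap]
  simp

-- ===== VERDICT (by name: the statement is the Claim_ definition above) =====
theorem get_HNF_diagonals_spec : Claim_equal_get_HNF_diagonals := by
  intro n _
  unfold Spec_get_HNF_diagonals get_HNF_diagonals_alt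
  by_cases hn : n < 1
  · simp [hn, get_HNF_diagonals, PySem.List.pyRange_one_eq_nil (show n + 1 ≤ 1 by omega)]
  · push_neg at hn
    rw [if_neg (by omega)]
    rw [a_eq_flatMap, divisors_eq_filter n hn]
    refine List.flatMap_congr ?_
    intro i hi
    simp only [List.mem_filter, PySem.List.mem_pyRange_one, decide_eq_true_eq,
      PySem.Int.mod_eq_zero_iff_dvd] at hi
    obtain ⟨⟨hi1, _⟩, hidvd⟩ := hi
    have hfd : PySem.Int.floordiv n i = n / i := PySem.Int.floordiv_eq_ediv_of_pos (by omega)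
    have hq1 : 1 ≤ PySem.Int.floordiv n i := by
      rw [hfd]; exact (quot_facts n i hn hi1 hidvd).2.1
    rw [divisors_eq_filter _ hq1]
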